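-- pv_equiv track=rewrite | github.com/Josef-MrBeam/Attraccess | apps/attractap-firmware/tools/build_individual_ca_certs.py | create_ca_data_file
-- ===== SOURCE A (Python) =====
-- def create_ca_data_file(cert_files, certificates_map):
--     """Create implementation file with certificate data."""
--     cpp_content = [
--         '#include "ca_index.hpp"',
--         "",
--         "// Individual CA certificate data"
--     ]
--
--     # Add certificate data arrays
--     for i, (name, filename) in enumerate(cert_files):
--         var_name = f"ca_cert_{i:02d}_data"
--         cert_data = certificates_map[name]['data']
--
--         cpp_content.append(f"const char {var_name}[] PROGMEM = R\"CERT(")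
--         cpp_content.append(cert_data)
--         cpp_content.append(")CERT\";")
--         cpp_content.append("")
--
--     # Add index array
--     cpp_content.extend([
--         "// CA certificate index array",
--         "const CACertInfo ca_certificates[CA_CERT_COUNT] PROGMEM = {"
--     ])
--
--     for i, (name, filename) in enumerate(cert_files):
--         var_name = f"ca_cert_{i:02d}_data"
--         cpp_content.append(f'    {{"{name}", "{filename}", {var_name}}},')
--
--     cpp_content.append("};")
--
--     return '\n'.join(cpp_content)
-- ===== SOURCE B (Python) =====
-- def create_ca_data_file(cert_files, certificates_map):
--     """Create implementation file with certificate data (recursive, direct string building)."""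
--     def emit(i, items):
--         # returns (data_section, index_section) as ready-made strings, built back-to-front
--         if not items:
--             return ("", "")
--         (name, filename) = items[0]
--         var_name = "ca_cert_%02d_data" % i
--         cert_data = certificates_map[name]['data']
--         data_rest, index_rest = emit(i + 1, items[1:])
--         return ('const char %s[] PROGMEM = R"CERT(\n%s\n)CERT";\n\n' % (var_name, cert_data) + data_rest,
--                 '    {"%s", "%s", %s},\n' % (name, filename, var_name) + index_rest)
--     data_section, index_section = emit(0, cert_files)
--     return ('#include "ca_index.hpp"\n\n// Individual CA certificate data\n'
--             + data_section
--             + '// CA certificate index array\nconst CACertInfo ca_certificates[CA_CERT_COUNT] PROGMEM = {\n'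
--             + index_section
--             + '};')
-- ===== Notes on version B (the rewrite author's own statement) =====
-- stated objective: alternative
-- what changed: A builds a flat list of lines in two enumerate loops and finishes with '\n'.join; B uses a recursive helper that returns the data section and the index section as two already-joined strings built back-to-front by direct concatenation (no line list, no join), which the top level splices between the fixed header/footer text.
import Mathlib
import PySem

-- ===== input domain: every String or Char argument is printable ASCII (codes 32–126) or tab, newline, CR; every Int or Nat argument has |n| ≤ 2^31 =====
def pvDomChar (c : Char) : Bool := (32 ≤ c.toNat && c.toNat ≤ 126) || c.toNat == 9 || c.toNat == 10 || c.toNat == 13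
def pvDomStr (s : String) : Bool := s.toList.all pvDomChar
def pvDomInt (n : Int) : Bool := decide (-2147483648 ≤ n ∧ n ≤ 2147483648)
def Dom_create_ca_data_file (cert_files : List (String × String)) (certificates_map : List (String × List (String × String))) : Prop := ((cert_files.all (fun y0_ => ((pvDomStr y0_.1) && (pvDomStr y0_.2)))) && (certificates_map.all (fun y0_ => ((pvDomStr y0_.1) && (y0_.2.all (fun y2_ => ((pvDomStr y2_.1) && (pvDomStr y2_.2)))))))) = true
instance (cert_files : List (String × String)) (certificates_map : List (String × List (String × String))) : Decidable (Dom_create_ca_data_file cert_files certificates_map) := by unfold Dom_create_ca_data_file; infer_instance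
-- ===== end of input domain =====

-- B replaces A's line-list + '\n'.join with a recursive helper that builds both sections
-- directly as strings (back-to-front), assembled by plain concatenation; same output, same cost.

-- f"ca_cert_{i:02d}_data" / "ca_cert_%02d_data" % i for the nonnegative enumerate index i (exact for 0 ≤ i)
def pvVarName (i : Int) : String :=
  if i < 10 then "ca_cert_0" ++ PySem.Int.toStr i ++ "_data"
  else "ca_cert_" ++ PySem.Int.toStr i ++ "_data"

-- certificates_map[name]['data']; Pre_ guarantees both lookups succeed, so the defaults are never used
def pvCertData (certificates_map : List (String × List (String × String))) (name : String) : String :=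
  ((PySem.Dict.mk (((PySem.Dict.mk certificates_map).get? name).getD [])).get? "data").getD ""

-- ===== PORT A =====
def create_ca_data_file (cert_files : List (String × String)) (certificates_map : List (String × List (String × String))) : String :=
  let cpp0 : List String := ["#include \"ca_index.hpp\"", "", "// Individual CA certificate data"]
  -- first pass: certificate data arrays
  let cpp1 := (PySem.List.enumerate cert_files 0).foldl (fun acc p =>
    let var_name := pvVarName p.1
    let cert_data := pvCertData certificates_map p.2.1
    acc ++ ["const char " ++ var_name ++ "[] PROGMEM = R\"CERT(", cert_data, ")CERT\";", ""]) cpp0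
  let cpp2 := cpp1 ++ ["// CA certificate index array", "const CACertInfo ca_certificates[CA_CERT_COUNT] PROGMEM = {"]
  -- second pass: index array rows
  let cpp3 := (PySem.List.enumerate cert_files 0).foldl (fun acc p =>
    let var_name := pvVarName p.1
    acc ++ ["    {\"" ++ p.2.1 ++ "\", \"" ++ p.2.2 ++ "\", " ++ var_name ++ "},"]) cpp2
  PySem.Str.join "\n" (cpp3 ++ ["};"])

-- ===== PORT B =====
-- emit(i, items): the recursive helper of Source B — returns the two sections as finished strings
def pvEmit (certificates_map : List (String × List (String × String))) : Int → List (String × String) → String × String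
  | _, [] => ("", "")
  | i, p :: rest =>
    let var_name := pvVarName i
    let cert_data := pvCertData certificates_map p.1
    let r := pvEmit certificates_map (i + 1) rest
    ("const char " ++ var_name ++ "[] PROGMEM = R\"CERT(\n" ++ cert_data ++ "\n)CERT\";\n\n" ++ r.1,
     "    {\"" ++ p.1 ++ "\", \"" ++ p.2 ++ "\", " ++ var_name ++ "},\n" ++ r.2)

def create_ca_data_file_alt (cert_files : List (String × String)) (certificates_map : List (String × List (String × String))) : String :=
  let s := pvEmit certificates_map 0 cert_files
  "#include \"ca_index.hpp\"\n\n// Individual CA certificate data\n" ++ s.1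
    ++ "// CA certificate index array\nconst CACertInfo ca_certificates[CA_CERT_COUNT] PROGMEM = {\n" ++ s.2
    ++ "};"

-- ===== PRECONDITION & SPEC =====
-- Pre_: every name in cert_files is a key of certificates_map whose value has a 'data' key
-- (elsewhere Python A raises KeyError)
def Pre_create_ca_data_file (cert_files : List (String × String)) (certificates_map : List (String × List (String × String))) : Prop :=
  cert_files.all (fun p =>
    match (PySem.Dict.mk certificates_map).get? p.1 with
    | none => false
    | some m => ((PySem.Dict.mk m).get? "data").isSome) = true
instance (cert_files : List (String × String)) (certificates_map : List (String × List (String × String))) : Decidable (Pre_create_ca_data_file cert_files certificates_map) := by unfold Pre_create_ca_data_file; infer_instance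

def pvWitness_create_ca_data_file : (List (String × String)) × (List (String × List (String × String))) :=
  ([("a", "a.pem")], [("a", [("data", "CERTDATA")])])

def Spec_create_ca_data_file (cert_files : List (String × String)) (certificates_map : List (String × List (String × String))) (out : String) : Prop := out = create_ca_data_file_alt cert_files certificates_map
instance (cert_files : List (String × String)) (certificates_map : List (String × List (String × String))) (out : String) : Decidable (Spec_create_ca_data_file cert_files certificates_map out) := by unfold Spec_create_ca_data_file; infer_instance

-- ===== CLAIM (what is proved, stated in full; the proofs are below) =====
def Claim_equal_create_ca_data_file : Prop := ∀ (cert_files : List (String × String)) (certificates_map : List (String × List (String × String))), Dom_create_ca_data_file cert_files certificates_map → Pre_create_ca_data_file cert_files certificates_map → Spec_create_ca_data_file cert_files certificates_map (create_ca_data_file cert_files certificates_map)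

-- ===== LEMMAS AND PROOFS =====

-- toList of the string literals both programs use (kernel facts, for the char-level rewriting)
theorem pvLit1 : "\n".toList = ['\n'] := by decide

-- '\n'.join(a :: t) for nonempty t, at the String level
theorem pv_join_cons_ne (a : String) (t : List String) (h : t ≠ []) :
    PySem.Str.join "\n" (a :: t) = a ++ "\n" ++ PySem.Str.join "\n" t := by
  obtain ⟨y, t, rfl⟩ := List.exists_cons_of_ne_nil h
  apply String.toList_inj.mp
  simp [PySem.Str.join, PySem.Chars.join_cons_cons, pvLit1]

theorem pv_join_singleton (a : String) : PySem.Str.join "\n" [a] = a := by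
  apply String.toList_inj.mp
  simp [PySem.Str.join, PySem.Chars.join, List.intercalate]

-- joined data-array lines of A = first component of B's emit (continued by any nonempty rest)
theorem pv_data_section (cm : List (String × List (String × String))) (l : List (String × String)) :
    ∀ (i : Int) (rest : List String), rest ≠ [] →
    PySem.Str.join "\n" ((PySem.List.enumerate l i).flatMap (fun p => ["const char " ++ pvVarName p.1 ++ "[] PROGMEM = R\"CERT(", pvCertData cm p.2.1, ")CERT\";", ""]) ++ rest)
      = (pvEmit cm i l).1 ++ PySem.Str.join "\n" rest := by
  induction l with
  | nil => intro i rest h; simp [pvEmit, PySem.List.enumerate_nil]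
  | cons p t ih =>
    intro i rest h
    have hne : (PySem.List.enumerate t (i + 1)).flatMap (fun p => ["const char " ++ pvVarName p.1 ++ "[] PROGMEM = R\"CERT(", pvCertData cm p.2.1, ")CERT\";", ""]) ++ rest ≠ [] := by
      simp [h]
    rw [PySem.List.enumerate_cons]
    simp only [List.flatMap_cons, List.cons_append, List.nil_append]
    rw [pv_join_cons_ne _ _ (by simp), pv_join_cons_ne _ _ (by simp),
        pv_join_cons_ne _ _ (by simp), pv_join_cons_ne _ _ hne, ih (i + 1) rest h]
    show _ = (pvEmit cm i (p :: t)).1 ++ _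
    simp only [pvEmit]
    apply String.toList_inj.mp
    simp [pvLit1, (by decide : "\n)CERT\";\n\n".toList = ['\n', ')', 'C', 'E', 'R', 'T', '"', ';', '\n', '\n']),
          (by decide : "[] PROGMEM = R\"CERT(\n".toList = '[' :: ']' :: ' ' :: 'P' :: 'R' :: 'O' :: 'G' :: 'M' :: 'E' :: 'M' :: ' ' :: '=' :: ' ' :: 'R' :: '"' :: 'C' :: 'E' :: 'R' :: 'T' :: '(' :: ['\n'])]

-- joined index rows of A (closed by "};") = second component of B's emit ++ "};"
theorem pv_index_section (cm : List (String × List (String × String))) (l : List (String × String)) :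
    ∀ (i : Int),
    PySem.Str.join "\n" ((PySem.List.enumerate l i).flatMap (fun p => ["    {\"" ++ p.2.1 ++ "\", \"" ++ p.2.2 ++ "\", " ++ pvVarName p.1 ++ "},"]) ++ ["};"])
      = (pvEmit cm i l).2 ++ "};" := by
  induction l with
  | nil => intro i; simp [pvEmit, PySem.List.enumerate_nil, pv_join_singleton]
  | cons p t ih =>
    intro i
    rw [PySem.List.enumerate_cons]
    simp only [List.flatMap_cons, List.cons_append, List.nil_append]
    rw [pv_join_cons_ne _ _ (by simp), ih (i + 1)]
    show _ = (pvEmit cm i (p :: t)).2 ++ _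
    simp only [pvEmit]
    apply String.toList_inj.mp
    simp [pvLit1, (by decide : "},".toList = ['}', ',']),
          (by decide : "},\n".toList = ['}', ',', '\n'])]

-- B's paired result vs the two folds: not needed — A is rewritten to flatMap form directly
theorem pv_foldl_flat (g : Int × (String × String) → List String) (l : List (Int × (String × String))) (init : List String) :
    l.foldl (fun acc x => acc ++ g x) init = init ++ l.flatMap g :=
  PySem.List.foldl_append_eq_flatMap g l init

-- ===== VERDICT (by name: the statement is the Claim_ definition above) =====
theorem create_ca_data_file_spec : Claim_equal_create_ca_data_file := by
  intro cert_files certificates_map _ _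
  unfold Spec_create_ca_data_file create_ca_data_file create_ca_data_file_alt
  simp only [pv_foldl_flat, List.append_assoc]
  have h3 := pv_data_section certificates_map cert_files 0
  have h4 := pv_index_section certificates_map cert_files 0
  simp only [List.cons_append, List.nil_append]
  rw [pv_join_cons_ne _ _ (by simp), pv_join_cons_ne _ _ (by simp), pv_join_cons_ne _ _ (by simp)]
  rw [h3 _ (by simp)]
  rw [pv_join_cons_ne _ _ (by simp), pv_join_cons_ne _ _ (by simp), h4]
  apply String.toList_inj.mp
  simp [pvLit1,
        (by decide : "#include \"ca_index.hpp\"\n\n// Individual CA certificate data\n".toList = "#include \"ca_index.hpp\"".toList ++ '\n' :: '\n' :: "// Individual CA certificate data".toList ++ ['\n']),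
        (by decide : "// CA certificate index array\nconst CACertInfo ca_certificates[CA_CERT_COUNT] PROGMEM = {\n".toList = "// CA certificate index array".toList ++ '\n' :: "const CACertInfo ca_certificates[CA_CERT_COUNT] PROGMEM = {".toList ++ ['\n'])]
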